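-- pv_equiv track=rewrite | github.com/alexandraback/datacollection | solutions_5634697451274240_0/Python/Khaelex/small.py | solve
-- ===== SOURCE A (Python) =====
-- def solve(s):
--     good=True
--     num_ops = 0
--     for c in reversed(s):
--         if c == '+':
--             if not good:
--                 good = True
--                 num_ops += 1
--         if c == '-':
--             if good:
--                 good = False
--                 num_ops += 1
--     return num_ops
-- ===== SOURCE B (Python) =====
-- def solve(s):
--     t = [c for c in s if c in '+-']
--     flips = sum(a != b for a, b in zip(t, t[1:]))
--     return flips + (1 if t and t[-1] == '-' else 0)
-- ===== Notes on version B (the rewrite author's own statement) =====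
-- stated objective: alternative
-- what changed: Replaces the right-to-left toggling-state accumulator with a forward pairwise computation: filter to the sign characters, count adjacent sign changes with zip, and add one when the final sign is negative.
import Mathlib
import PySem

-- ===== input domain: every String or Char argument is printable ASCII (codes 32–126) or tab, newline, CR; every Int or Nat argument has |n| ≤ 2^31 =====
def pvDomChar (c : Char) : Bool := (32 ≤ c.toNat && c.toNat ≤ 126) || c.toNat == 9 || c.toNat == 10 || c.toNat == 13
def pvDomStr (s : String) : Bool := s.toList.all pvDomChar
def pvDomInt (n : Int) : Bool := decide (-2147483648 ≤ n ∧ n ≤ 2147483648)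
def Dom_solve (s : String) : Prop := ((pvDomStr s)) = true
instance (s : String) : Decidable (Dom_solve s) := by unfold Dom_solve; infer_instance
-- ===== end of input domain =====

-- B replaces A's right-to-left toggling-state accumulator by a forward pairwise count
-- of adjacent sign changes plus a check of the last sign (alternative decomposition).

-- ===== PORT A =====
-- loop body of A: the two sequential ifs on c, updating (good, num_ops)
def solveStep (st : Bool × Int) (c : Char) : Bool × Int :=
  let st1 := if c = '+' then (if st.1 = false then (true, st.2 + 1) else st) else st
  if c = '-' then (if st1.1 = true then (false, st1.2 + 1) else st1) else st1

def solve (s : String) : Int :=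
  (s.toList.reverse.foldl solveStep (true, 0)).2

-- ===== PORT B =====
-- B-side helper: the membership test c in '+-'
def pmB (c : Char) : Bool := c == '+' || c == '-'

def solve_alt (s : String) : Int :=
  let t := s.toList.filter pmB
  let flips : Int :=
    (t.zip t.tail).foldl (fun acc p => acc + (if p.1 ≠ p.2 then 1 else 0)) 0
  flips + (if t.getLast? = some '-' then 1 else 0)

-- ===== PRECONDITION & SPEC =====
def Spec_solve (s : String) (out : Int) : Prop := out = solve_alt s
instance (s : String) (out : Int) : Decidable (Spec_solve s out) := by unfold Spec_solve; infer_instance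

-- ===== CLAIM (what is proved, stated in full; the proofs are below) =====
def Claim_equal_solve : Prop := ∀ (s : String), Dom_solve s → Spec_solve s (solve s)

-- ===== LEMMAS AND PROOFS =====

-- count of adjacent unequal pairs, structurally
def pd : List Char → Int
  | [] => 0
  | [_] => 0
  | a :: b :: r => (if a ≠ b then 1 else 0) + pd (b :: r)

lemma stepA_id (st : Bool × Int) (c : Char) (h : pmB c = false) : solveStep st c = st := by
  simp [pmB] at h
  simp [solveStep, h.1, h.2]

lemma fold_filter (l : List Char) (st : Bool × Int) :
    l.foldl solveStep st = (l.filter pmB).foldl solveStep st := by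
  induction l generalizing st with
  | nil => rfl
  | cons c l ih =>
    by_cases h : pmB c = true
    · simp [List.filter, h, List.foldl, ih]
    · simp only [Bool.not_eq_true] at h
      simp [List.filter, h, List.foldl, stepA_id _ _ h, ih]

lemma pairsFold (t : List Char) (acc : Int) :
    (t.zip t.tail).foldl (fun acc p => acc + (if p.1 ≠ p.2 then 1 else 0)) acc = acc + pd t := by
  induction t generalizing acc with
  | nil => simp [pd]
  | cons a r ih =>
    cases r with
    | nil => simp [pd]
    | cons b r' =>
      have := ih (acc + (if a ≠ b then 1 else 0))
      simp only [List.tail_cons] at this ⊢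
      simp only [List.zip_cons_cons, List.foldl_cons, pd]
      rw [this]; ring

lemma pd_append_single (l : List Char) (x : Char) :
    pd (l ++ [x]) = pd l +
      (match l.getLast? with
       | none => 0
       | some y => if y ≠ x then 1 else 0) := by
  induction l with
  | nil => simp [pd]
  | cons a l ih =>
    cases l with
    | nil => simp [pd]
    | cons b l' =>
      simp only [List.cons_append, pd] at *
      rw [ih]
      have : (b :: l').getLast? = ((a :: b :: l').getLast?) := by
        simp [List.getLast?_cons_cons]
      rw [this]; ring

lemma pd_reverse (l : List Char) : pd l.reverse = pd l := by
  induction l with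
  | nil => rfl
  | cons c l ih =>
    rw [List.reverse_cons, pd_append_single, ih, List.getLast?_reverse]
    cases l with
    | nil => simp [pd]
    | cons d l' =>
      simp only [List.head?_cons, pd]
      have : (d ≠ c) = (c ≠ d) := by
        simp [ne_comm]
      simp [this, add_comm]

-- characterisation of A's fold on a list of only '+'/'-' characters
lemma A_char (u : List Char) (good : Bool) (n : Int) (h : ∀ c ∈ u, pmB c = true) :
    (u.foldl solveStep (good, n)).2 =
      n + pd u + (if u.head? = some (if good then '-' else '+') then 1 else 0) := by
  induction u generalizing good n with
  | nil => simp [pd]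
  | cons c u ih =>
    have hc : c = '+' ∨ c = '-' := by
      have := h c (by simp)
      simp [pmB] at this
      rcases this with h' | h' <;> [left; right] <;> exact h'
    have hu : ∀ c ∈ u, pmB c = true := fun d hd => h d (by simp [hd])
    have hstep : solveStep (good, n) c =
        ((c == '+'), n + (if c = (if good then '-' else '+') then 1 else 0)) := by
      rcases hc with rfl | rfl <;> cases good <;> simp [solveStep]
    rw [List.foldl_cons, hstep, ih _ _ hu]
    cases u with
    | nil => rcases hc with rfl | rfl <;> cases good <;> simp [pd]
    | cons d u' =>
      have hd : d = '+' ∨ d = '-' := by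
        have := hu d (by simp)
        simp [pmB] at this
        rcases this with h' | h' <;> [left; right] <;> exact h'
      simp only [List.head?_cons, pd]
      rcases hc with rfl | rfl <;> rcases hd with rfl | rfl <;> cases good <;> simp <;> ring

-- ===== VERDICT (by name: the statement is the Claim_ definition above) =====
theorem solve_spec : Claim_equal_solve := by
  intro s _
  unfold Spec_solve solve solve_alt
  rw [fold_filter, List.filter_reverse]
  set t := s.toList.filter pmB with ht
  have hmem : ∀ c ∈ t.reverse, pmB c = true := by
    intro c hc
    rw [List.mem_reverse] at hc
    exact (List.mem_filter.mp hc).2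
  rw [A_char t.reverse true 0 hmem, pd_reverse, List.head?_reverse]
  simp only [pairsFold, zero_add]
  simp
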